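-- pv_equiv track=rewrite | github.com/tribixbite/neural-swipe-typing | src/data_obtaining_and_preprocessing/convert_swipelogs_to_jsonl.py | group_events_by_swipe
-- ===== SOURCE A (Python) =====
-- from typing import Dict, List, Tuple, Optional
--
-- def group_events_by_swipe(events: List[Dict]) -> List[List[Dict]]:
--     """
--     Group touch events into individual swipes.
--     A swipe starts with touchstart and ends with touchend.
--     """
--     swipes = []
--     current_swipe = []
--
--     for event in events:
--         if event['event'] == 'touchstart':
--             if current_swipe:  # Save previous swipe if exists
--                 swipes.append(current_swipe)
--             current_swipe = [event]
--         elif event['event'] in ['touchmove', 'touchend']: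
--             if current_swipe:  # Only add if we have a started swipe
--                 current_swipe.append(event)
--                 if event['event'] == 'touchend':
--                     swipes.append(current_swipe)
--                     current_swipe = []
--
--     # Handle case where last swipe didn't end properly
--     if current_swipe:
--         swipes.append(current_swipe)
--
--     return swipes
-- ===== SOURCE B (Python) =====
-- def group_events_by_swipe(events):
--     """
--     Group touch events into individual swipes.
--     Two-level scan: the outer loop advances to each touchstart, the inner
--     loop cuts out one swipe (up to the next touchstart or the first touchend).
--     """
--     swipes = []
--     i, n = 0, len(events)
--     while i < n:
--         if events[i]['event'] != 'touchstart':
--             i += 1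
--             continue
--         swipe = [events[i]]
--         i += 1
--         while i < n and events[i]['event'] != 'touchstart':
--             e = events[i]
--             i += 1
--             t = e['event']
--             if t == 'touchend':
--                 swipe.append(e)
--                 break
--             if t == 'touchmove':
--                 swipe.append(e)
--         swipes.append(swipe)
--     return swipes
-- ===== Notes on version B (the rewrite author's own statement) =====
-- stated objective: alternative
-- what changed: Replaces A's one-pass state machine carrying (swipes, current_swipe) accumulators with a two-level scan: an outer loop that advances to each touchstart and an inner loop that cuts out one whole swipe, stopping at the next touchstart or right after the first touchend.
import Mathlib
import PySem

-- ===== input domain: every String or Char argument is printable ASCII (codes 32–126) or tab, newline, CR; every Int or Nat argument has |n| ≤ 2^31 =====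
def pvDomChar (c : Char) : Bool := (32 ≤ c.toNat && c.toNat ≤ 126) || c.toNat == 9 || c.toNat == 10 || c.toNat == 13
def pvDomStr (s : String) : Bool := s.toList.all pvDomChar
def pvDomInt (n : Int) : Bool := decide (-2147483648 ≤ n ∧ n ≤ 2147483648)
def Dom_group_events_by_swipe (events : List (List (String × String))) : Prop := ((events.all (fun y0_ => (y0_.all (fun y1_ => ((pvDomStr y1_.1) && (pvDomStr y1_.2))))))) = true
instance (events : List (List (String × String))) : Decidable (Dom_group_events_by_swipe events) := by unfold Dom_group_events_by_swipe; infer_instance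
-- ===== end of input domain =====

-- B is an alternative decomposition (same cost): a two-level scan instead of A's one-pass
-- (swipes, current_swipe) state machine; return values proved equal wherever A returns.

-- event['event'] (KeyError, i.e. none, is excluded by Pre_; both ports read it the same way)
def pvEv (e : List (String × String)) : String := ((PySem.Dict.mk e).get? "event").getD ""

-- ===== PORT A =====
-- one fold step = one iteration of A's for-loop over the state (swipes, current_swipe)
def pvStepA (st : List (List (List (String × String))) × List (List (String × String)))
    (e : List (String × String)) :
    List (List (List (String × String))) × List (List (String × String)) :=
  if pvEv e = "touchstart" then
    ((if st.2.isEmpty then st.1 else st.1 ++ [st.2]), [e])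
  else if pvEv e = "touchmove" ∨ pvEv e = "touchend" then
    if st.2.isEmpty then st
    else if pvEv e = "touchend" then (st.1 ++ [st.2 ++ [e]], [])
    else (st.1, st.2 ++ [e])
  else st

def group_events_by_swipe (events : List (List (String × String))) : List (List (List (String × String))) :=
  let st := events.foldl pvStepA ([], [])
  if st.2.isEmpty then st.1 else st.1 ++ [st.2]

-- ===== PORT B =====
-- B's inner while-loop: collect one swipe (acc already holds the opening touchstart),
-- returning the swipe and the unconsumed suffix
def pvTakeSwipe (acc : List (List (String × String))) :
    List (List (String × String)) → List (List (String × String)) × List (List (String × String))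
  | [] => (acc, [])
  | e :: r =>
    if pvEv e = "touchstart" then (acc, e :: r)
    else if pvEv e = "touchend" then (acc ++ [e], r)
    else if pvEv e = "touchmove" then pvTakeSwipe (acc ++ [e]) r
    else pvTakeSwipe acc r

theorem pvTakeSwipe_rest_le (rest : List (List (String × String))) (acc : List (List (String × String))) :
    (pvTakeSwipe acc rest).2.length ≤ rest.length := by
  induction rest generalizing acc with
  | nil => simp [pvTakeSwipe]
  | cons e r ih =>
    simp only [pvTakeSwipe]
    split_ifs <;> simp <;> exact le_trans (ih _) (Nat.le_succ _)

-- B's outer while-loop: advance to each touchstart, cut out one swipe, continue on the rest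
def pvOuter : List (List (String × String)) → List (List (List (String × String)))
  | [] => []
  | e :: rest =>
    if pvEv e = "touchstart" then
      let p := pvTakeSwipe [e] rest
      p.1 :: pvOuter p.2
    else pvOuter rest
termination_by l => l.length
decreasing_by
  · exact Nat.lt_succ_of_le (pvTakeSwipe_rest_le rest [e])
  · simp

def group_events_by_swipe_alt (events : List (List (String × String))) : List (List (List (String × String))) :=
  pvOuter events

-- ===== PRECONDITION & SPEC =====
-- Pre_ excludes exactly the inputs on which Python A raises KeyError: some event dict lacks the key 'event'.
def Pre_group_events_by_swipe (events : List (List (String × String))) : Prop :=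
  ∀ e ∈ events, ((PySem.Dict.mk e).get? "event").isSome
instance (events : List (List (String × String))) : Decidable (Pre_group_events_by_swipe events) := by unfold Pre_group_events_by_swipe; infer_instance
def pvWitness_group_events_by_swipe : (List (List (String × String))) :=
  [[("event", "touchstart"), ("x", "1")], [("event", "touchmove")], [("event", "touchend")]]

def Spec_group_events_by_swipe (events : List (List (String × String))) (out : List (List (List (String × String)))) : Prop := out = group_events_by_swipe_alt events
instance (events : List (List (String × String))) (out : List (List (List (String × String)))) : Decidable (Spec_group_events_by_swipe events out) := by unfold Spec_group_events_by_swipe; infer_instance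

-- ===== CLAIM (what is proved, stated in full; the proofs are below) =====
def Claim_equal_group_events_by_swipe : Prop := ∀ (events : List (List (String × String))), Dom_group_events_by_swipe events → Pre_group_events_by_swipe events → Spec_group_events_by_swipe events (group_events_by_swipe events)

-- ===== LEMMAS AND PROOFS =====

-- A's terminal flush ("if current_swipe: swipes.append(current_swipe)")
def pvFinish (st : List (List (List (String × String))) × List (List (String × String))) :
    List (List (List (String × String))) :=
  if st.2.isEmpty then st.1 else st.1 ++ [st.2]

-- the loop invariant tying A's state machine to B's two-level scan
theorem pvMain (rest : List (List (String × String)))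
    (sw : List (List (List (String × String)))) (cur : List (List (String × String))) :
    pvFinish (rest.foldl pvStepA (sw, cur)) =
      sw ++ (if cur.isEmpty then pvOuter rest
             else (pvTakeSwipe cur rest).1 :: pvOuter (pvTakeSwipe cur rest).2) := by
  induction rest generalizing sw cur with
  | nil =>
    cases cur <;> simp [pvFinish, pvTakeSwipe, pvOuter]
  | cons e r ih =>
    by_cases hs : pvEv e = "touchstart"
    · cases cur with
      | nil =>
        simp [List.foldl_cons, pvStepA, hs, ih, pvOuter]
      | cons c cs =>
        simp [List.foldl_cons, pvStepA, hs, ih, pvTakeSwipe, pvOuter]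
    · by_cases he : pvEv e = "touchend"
      · cases cur with
        | nil => simp [List.foldl_cons, pvStepA, he, ih, pvOuter]
        | cons c cs => simp [List.foldl_cons, pvStepA, he, ih, pvTakeSwipe]
      · by_cases hm : pvEv e = "touchmove"
        · cases cur with
          | nil => simp [List.foldl_cons, pvStepA, hm, ih, pvOuter]
          | cons c cs =>
            simp [List.foldl_cons, pvStepA, hm, ih, pvTakeSwipe]
        · cases cur with
          | nil => simp [List.foldl_cons, pvStepA, hs, hm, he, ih, pvOuter]
          | cons c cs => simp [List.foldl_cons, pvStepA, hs, hm, he, ih, pvTakeSwipe]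

-- ===== VERDICT (by name: the statement is the Claim_ definition above) =====
theorem group_events_by_swipe_spec : Claim_equal_group_events_by_swipe := by
  intro events _ _
  show group_events_by_swipe events = group_events_by_swipe_alt events
  have h := pvMain events [] []
  simpa [group_events_by_swipe, pvFinish, group_events_by_swipe_alt] using h
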